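-- pv_equiv track=rewrite | github.com/ward-segers/courses | achterhoede.py | zeggen
-- ===== SOURCE A (Python) =====
-- def zeggen(kleuren_in_hoofd):
--     # Stap 2: Bepaal wat elke persoon zegt, door de kleuren in hun hoofd aan te passen
--     kleuren_gezegd = []
--     voorbije_gok = 0  # Houd bij hoeveel keer 'R' is gezegd
--     for kleur in kleuren_in_hoofd:
--         # Als het aantal keer 'R' eerder is gezegd oneven is, wissel de kleur
--         if voorbije_gok % 2 == 1:
--             if kleur == 'R':
--                 kleuren_gezegd.append('B')
--             else:
--                 kleuren_gezegd.append('R')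
--         else:
--             kleuren_gezegd.append(kleur)
--
--         # Tel de huidige 'R' bij voorbije_gok
--         if kleur == 'R':
--             voorbije_gok += 1
--
--     return tuple(kleuren_gezegd)
-- ===== SOURCE B (Python) =====
-- def _geflipt(seg):
--     # flip a whole segment: 'R' -> 'B', anything else -> 'R'
--     return ['B' if k == 'R' else 'R' for k in seg]
--
-- def zeggen(kleuren_in_hoofd):
--     # Segment-wise: alternately copy / flip whole chunks ending at the next 'R',
--     # found by list.index; no per-element counter or parity is kept.
--     out = []
--     rest = list(kleuren_in_hoofd)
--     while True:
--         # copy phase: emit verbatim up to and including the next 'R'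
--         if 'R' not in rest:
--             out += rest
--             break
--         j = rest.index('R')
--         out += rest[:j + 1]
--         rest = rest[j + 1:]
--         # flip phase: emit flipped up to and including the next 'R'
--         if 'R' not in rest:
--             out += _geflipt(rest)
--             break
--         j = rest.index('R')
--         out += _geflipt(rest[:j + 1])
--         rest = rest[j + 1:]
--     return tuple(out)
-- ===== Notes on version B (the rewrite author's own statement) =====
-- stated objective: alternative
-- what changed: Replaced A's per-element loop with a running 'R' counter by a segment-wise loop that locates the next 'R' with list.index and alternately copies or flips whole slices, so no counter or per-element parity decision is kept.
import Mathlib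
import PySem

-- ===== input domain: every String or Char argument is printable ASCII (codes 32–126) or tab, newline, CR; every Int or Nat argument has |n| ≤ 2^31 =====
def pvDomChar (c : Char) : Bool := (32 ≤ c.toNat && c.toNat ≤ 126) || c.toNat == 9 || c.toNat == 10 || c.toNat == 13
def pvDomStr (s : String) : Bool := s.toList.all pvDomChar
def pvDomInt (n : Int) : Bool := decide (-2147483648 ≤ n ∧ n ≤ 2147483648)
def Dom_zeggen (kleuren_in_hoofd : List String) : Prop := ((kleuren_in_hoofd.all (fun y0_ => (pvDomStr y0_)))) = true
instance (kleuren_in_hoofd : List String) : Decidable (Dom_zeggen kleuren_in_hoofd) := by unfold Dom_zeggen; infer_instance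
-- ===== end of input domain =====

-- B replaces A's per-element loop with a running 'R' counter by a segment-wise loop:
-- it searches the next 'R' with list.index and alternately copies / flips whole slices;
-- alternative decomposition, same cost.

-- ===== PORT A =====
-- single loop: append the (possibly flipped) colour, then update the running 'R' counter
def zeggen (kleuren_in_hoofd : List String) : List String :=
  (kleuren_in_hoofd.foldl
    (fun (st : List String × Int) kleur =>
      let kleuren_gezegd :=
        if PySem.Int.mod st.2 2 == 1 then
          if kleur == "R" then st.1 ++ ["B"] else st.1 ++ ["R"]
        else st.1 ++ [kleur]
      let voorbije_gok := if kleur == "R" then st.2 + 1 else st.2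
      (kleuren_gezegd, voorbije_gok))
    ([], 0)).1

-- ===== PORT B =====
-- Source B's _geflipt: flip a whole segment
def pvGeflipt (seg : List String) : List String :=
  seg.map (fun k => if k == "R" then "B" else "R")

-- Source B's while loop: state is (out, rest); index? combines the `'R' not in rest`
-- test with `rest.index('R')` (none exactly when the membership test fails)
def zeggenLus (out rest : List String) : List String :=
  match h1 : PySem.List.index? rest "R" with
  | none => out ++ rest
  | some j =>
    match h2 : PySem.List.index? (PySem.List.slice rest (some ((j + 1 : Nat) : Int)) none) "R" with
    | none =>
      (out ++ PySem.List.slice rest none (some ((j + 1 : Nat) : Int)))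
        ++ pvGeflipt (PySem.List.slice rest (some ((j + 1 : Nat) : Int)) none)
    | some j2 =>
      zeggenLus
        ((out ++ PySem.List.slice rest none (some ((j + 1 : Nat) : Int)))
          ++ pvGeflipt (PySem.List.slice
                (PySem.List.slice rest (some ((j + 1 : Nat) : Int)) none)
                none (some ((j2 + 1 : Nat) : Int))))
        (PySem.List.slice (PySem.List.slice rest (some ((j + 1 : Nat) : Int)) none)
          (some ((j2 + 1 : Nat) : Int)) none)
termination_by rest.length
decreasing_by
  have hmem : "R" ∈ rest := (PySem.List.index?_isSome_iff rest "R").1 (h1 ▸ rfl)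
  have hne : rest ≠ [] := by rintro rfl; simp at hmem
  have : 0 < rest.length := List.length_pos_iff.2 hne
  simp only [PySem.List.slice_from_natCast, List.drop_drop, List.length_drop]
  omega

def zeggen_alt (kleuren_in_hoofd : List String) : List String :=
  zeggenLus [] kleuren_in_hoofd

-- ===== PRECONDITION & SPEC =====
def Spec_zeggen (kleuren_in_hoofd : List String) (out : List String) : Prop := out = zeggen_alt kleuren_in_hoofd
instance (kleuren_in_hoofd : List String) (out : List String) : Decidable (Spec_zeggen kleuren_in_hoofd out) := by unfold Spec_zeggen; infer_instance

-- ===== CLAIM (what is proved, stated in full; the proofs are below) =====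
def Claim_equal_zeggen : Prop := ∀ (kleuren_in_hoofd : List String), Dom_zeggen kleuren_in_hoofd → Spec_zeggen kleuren_in_hoofd (zeggen kleuren_in_hoofd)

-- ===== LEMMAS AND PROOFS =====

-- reference function both ports are reduced to: position-wise flip by preceding-'R' parity
def pvSpec (mode : Bool) : List String → List String
  | [] => []
  | k :: ks => (if mode then (if k == "R" then "B" else "R") else k) :: pvSpec (xor mode (k == "R")) ks

lemma pv_mod_succ (c : Int) : ((c + 1) % 2 == 1) = !(c % 2 == 1) := by
  rcases Int.emod_two_eq_zero_or_one c with h | h <;> simp [Int.add_emod, h]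

lemma pv_fold_eq (l : List String) (acc : List String) (c : Int) :
    (l.foldl
      (fun (st : List String × Int) kleur =>
        ((if PySem.Int.mod st.2 2 == 1 then
            if kleur == "R" then st.1 ++ ["B"] else st.1 ++ ["R"]
          else st.1 ++ [kleur]),
         (if kleur == "R" then st.2 + 1 else st.2))) (acc, c)).1
    = acc ++ pvSpec (PySem.Int.mod c 2 == 1) l := by
  induction l generalizing acc c with
  | nil => simp [pvSpec]
  | cons k ks ih =>
    rw [List.foldl_cons, ih]
    simp only [show ∀ d : Int, PySem.Int.mod d 2 = d % 2 from
      fun d => PySem.Int.mod_eq_emod_of_pos (by norm_num)]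
    by_cases hk : k = "R"
    · subst hk
      by_cases hp : (c % 2 == 1) = true
      · simp [pvSpec, hp, pv_mod_succ]
      · simp only [Bool.not_eq_true] at hp
        simp [pvSpec, hp, pv_mod_succ]
    · have hk' : (k == "R") = false := by simp [hk]
      by_cases hp : (c % 2 == 1) = true
      · simp [pvSpec, hk', hp]
      · simp only [Bool.not_eq_true] at hp
        simp [pvSpec, hk', hp]

lemma pvSpec_no_R (mode : Bool) (l : List String) (h : "R" ∉ l) :
    pvSpec mode l = if mode then pvGeflipt l else l := by
  induction l with
  | nil => cases mode <;> simp [pvSpec, pvGeflipt]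
  | cons k ks ih =>
    simp only [List.mem_cons, not_or] at h
    have hkne : k ≠ "R" := fun e => h.1 e.symm
    have hk : (k == "R") = false := by simp [hkne]
    cases mode <;> simp [pvSpec, pvGeflipt, hk, hkne, ih h.2]

lemma pvSpec_append_R (mode : Bool) (pre suf : List String) (h : "R" ∉ pre) :
    pvSpec mode (pre ++ "R" :: suf)
      = (if mode then pvGeflipt pre else pre) ++ (if mode then "B" else "R") :: pvSpec (!mode) suf := by
  induction pre with
  | nil => cases mode <;> simp [pvSpec, pvGeflipt]
  | cons k ks ih =>
    simp only [List.mem_cons, not_or] at h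
    have hkne : k ≠ "R" := fun e => h.1 e.symm
    have hk : (k == "R") = false := by simp [hkne]
    cases mode <;> simp [pvSpec, pvGeflipt, hk, hkne, ih h.2]

lemma pvGeflipt_append (a b : List String) : pvGeflipt (a ++ b) = pvGeflipt a ++ pvGeflipt b := by
  simp [pvGeflipt]

lemma pv_slice_take (pre suf : List String) (j : Nat) (hlenp : pre.length = j) :
    PySem.List.slice (pre ++ "R" :: suf) none (some ((j + 1 : Nat) : Int)) = pre ++ ["R"] := by
  rw [PySem.List.slice_to_natCast,
      show pre ++ "R" :: suf = (pre ++ ["R"]) ++ suf by simp,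
      show j + 1 = (pre ++ ["R"]).length by simp [hlenp], List.take_left]

lemma pv_slice_drop (pre suf : List String) (j : Nat) (hlenp : pre.length = j) :
    PySem.List.slice (pre ++ "R" :: suf) (some ((j + 1 : Nat) : Int)) none = suf := by
  rw [PySem.List.slice_from_natCast,
      show pre ++ "R" :: suf = (pre ++ ["R"]) ++ suf by simp,
      show j + 1 = (pre ++ ["R"]).length by simp [hlenp], List.drop_left]

lemma zeggenLus_eq (n : Nat) : ∀ (out rest : List String), rest.length ≤ n →
    zeggenLus out rest = out ++ pvSpec false rest := by
  induction n with
  | zero =>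
    intro out rest h
    have : rest = [] := List.eq_nil_of_length_eq_zero (Nat.le_zero.1 h)
    subst this
    rw [zeggenLus]
    simp [pvSpec]
  | succ n ih =>
    intro out rest hlen
    rw [zeggenLus.eq_def]
    split
    · next h1 =>
      have : "R" ∉ rest := (PySem.List.index?_eq_none_iff rest "R").1 h1
      rw [pvSpec_no_R false rest this]; simp
    · next j h1 =>
      obtain ⟨pre, suf, hrest, hlenp, hpre⟩ := (PySem.List.index?_eq_some_iff rest "R" j).1 h1
      subst hrest
      rw [pv_slice_take pre suf j hlenp, pv_slice_drop pre suf j hlenp,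
          pvSpec_append_R false pre suf hpre]
      split
      · next h2 =>
        have hno : "R" ∉ suf := (PySem.List.index?_eq_none_iff suf "R").1 h2
        simp [pvSpec_no_R true suf hno]
      · next j2 h2 =>
        obtain ⟨pre2, suf2, hsuf, hlenp2, hpre2⟩ := (PySem.List.index?_eq_some_iff suf "R" j2).1 h2
        subst hsuf
        rw [pv_slice_take pre2 suf2 j2 hlenp2, pv_slice_drop pre2 suf2 j2 hlenp2]
        have hrec : suf2.length ≤ n := by
          simp only [List.length_append, List.length_cons] at hlen
          omega
        rw [ih _ suf2 hrec]
        simp only [Bool.not_false, pvSpec_append_R true pre2 suf2 hpre2, pvGeflipt_append]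
        simp [pvGeflipt]

-- ===== VERDICT (by name: the statement is the Claim_ definition above) =====
theorem zeggen_spec : Claim_equal_zeggen := by
  intro l _
  show zeggen l = zeggen_alt l
  unfold zeggen zeggen_alt
  rw [pv_fold_eq, zeggenLus_eq l.length [] l (le_refl _)]
  norm_num [PySem.Int.mod]
  rfl
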